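/- GENERATED by mk_final_copies.py from the proof of the farm's unit `decode_all.3` (farm:decode_all.3.1: Proof.lean) as the
   re-elaboration sweep compiled it — do not edit. -/
import Asan.CheckWalk
import Vorbis.Spec.Units.decode_all_3

/- SEGMENT 3 OF decode_all (the frame loop's head 1035C5H … the call of stb_vorbis_get_frame_float at 1035D5H, 6 instructions), in the
   farm's format: from `AtLoop k st` to `AtGot k st n` (after the call) or `AtDone st` (`k ≥ len`). It consumes the loop assertion as an
   ENTRY and builds the two exits: the validation of `DBody`. The walk starts at `v` in the middle of the function; `u` is the state
   at the function's entry. -/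
open X86 X86.User Asan Vorbis Vorbis.Spec

set_option maxRecDepth 4000
set_option maxHeartbeats 4000000

namespace Vorbis.Spec.decode_all_3

/-- The signed value of the low half of a small number (`cmp r12d, r13d` compares `k` and `len` as `int`s). -/
theorem seg3_toInt (n : Nat) (h : n < 2 ^ 31) : (Word.part .w32 (UInt64.ofNat n)).toInt = (n : Int) := by
  have hp : (Word.part .w32 (UInt64.ofNat n)).toNat = n := by
    show (BitVec.setWidth 32 (UInt64.ofNat n).toBitVec).toNat = _
    rw [BitVec.toNat_setWidth]
    show (UInt64.ofNat n).toNat % 2 ^ 32 = n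
    rw [UInt64.toNat_ofNat']
    omega
  have hc := BitVec.toInt_eq_toNat_cond (Word.part .w32 (UInt64.ofNat n))
  have hb : (2 : Nat) ^ Width.w32.bits = 4294967296 := rfl
  rw [hb] at hc
  split at hc <;> omega

/-- **The caller's footprint through a callee's**: every window of the callee lies inside a window of the caller
(`Reader.sameExcept_through_callee`, which this unit's statement does not import). -/
theorem seg3_through_callee {ws ws' : List Span} {m0 m1 m2 : Mem} (h : Mem.SameExcept ws m0 m1)
    (hs : Mem.SameExcept ws' m1 m2) (hsub : ∀ w ∈ ws', InSpans ws w.lo (w.hi - w.lo)) : Mem.SameExcept ws m0 m2 := by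
  apply h.step_same hs
  intro w hw a h1 h2
  obtain ⟨w', hw', k1, k2⟩ := hsub w hw
  exact ⟨w', hw', by omega, by omega⟩

end Vorbis.Spec.decode_all_3

open Vorbis.Spec.decode_all_3

/-- **Segment 3**: the loop's test, then either the loop's exit (`AtDone`: nothing was written) or the call of
stb_vorbis_get_frame_float — its precondition: the shadow layer and the invariant over the pushed return address
(`DecodeInv.carry` with `da_allKept_stack_shadow`), `&ch`, `&chan` objects of the own frame (`da_stackObj`) — and `AtGot` from its
postcondition and footprint. -/
theorem Vorbis.Spec.Worked.decode_all_3_ok : Vorbis.Spec.decode_all_3.Statement := by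
  intro Lay hLay μ hμ u₀ hcode h_gff others frames len u ret others' A ysz f k st v hat
  obtain ⟨j_rip, hbody, c_r12, hkle⟩ := hat
  obtain ⟨hfrm, c_rbx, c_rbp, c_r14, c_r13, k_sh, k_room, k_st, hstle, harena, hdi⟩ := hbody
  have he := hfrm.entry
  have he0 := he
  have hpre0 := hfrm.pre
  have hpre := hpre0
  v_entry he
  obtain ⟨hsh, hrdi, hrsi, hlen, hrdx, hrcx, hr8, hr9, hfix, hfree, hconsts⟩ := hpre
  obtain ⟨_, _, c_rsp, k_r15, k_r14, k_r13, k_r12, k_rbp, k_rbx, k_ret, k_out, hsame, j_code, j_inv, hinv, hfixed, hoffT⟩ := hfrm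
  obtain ⟨hAB, hAL⟩ := harena
  have hgff := h_gff others' (decode_all.ownFrames u frames) len A 0 0 ysz
  clear h_gff
  have hk31 := seg3_toInt k (by omega)
  have hl31 := seg3_toInt len (by omega)
  have w_rip := j_rip
  have w_eq := Vorbis.conv_code_eqOn j_code
  have hdf : v.flags .df = false := (show X86.User.abiInv _ from j_inv).1
  have hmx : v.mxcsr &&& 0x1F80 = 0x1F80 := (show X86.User.abiInv _ from j_inv).2
  have w_kept : RegsKept [.rsp] v v := RegsKept.refl _ _
  u_walk hcode [hμ.vendor] until [Vorbis.L.decode_all.cut3, Vorbis.L.decode_all.at_103640] span [Vorbis.L.textLo, Vorbis.L.textHi] side (v_side)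
  case call_inv =>
    v_inv
  case pre_1035d5 =>
    -- the precondition of stb_vorbis_get_frame_float: one store since `v`, the return address at `R − 240`
    have e_rsp : (s_1035d5.reg .rsp).toNat + 8 = (u.reg .rsp).toNat - 232 := by
      rw [w_rsp]
      u_omega
    have hinv' : ShadowInv others' (decode_all.ownFrames u frames) ((u.reg .rsp).toNat - 232) s_1035d5.mem := by
      rw [w_mem]
      exact ShadowInv.writeLE hinv _ _ _ (by u_omega) (by u_omega)
    have hs : Mem.SameExcept [⟨(u.reg .rsp).toNat - 240, (u.reg .rsp).toNat⟩, ⟨0xC00000, 0xE00000⟩] v.mem s_1035d5.mem := by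
      u_same
    have hk : AllKept (RunBlk A len) v.mem s_1035d5.mem := decode_all.da_allKept_stack_shadow hdi hs (by omega) (by omega)
    have hdi' := hdi.carry hinv hk hinv'
    have e1 : (u.reg .rsp - 136).toNat = (u.reg .rsp).toNat - 184 + 48 := by u_omega
    have e2 : (u.reg .rsp - 120).toNat = (u.reg .rsp).toNat - 184 + 64 := by u_omega
    refine ⟨⟨?_, hoffT⟩, ?_, ?_, ?_, ?_⟩
    · rw [e_rsp]
      exact hinv'
    · rw [w_rdi, c_r14]
      exact hdi'
    · right
      rw [w_rsi, e1]
      refine decode_all.da_stackObj 48 4 ?_ (by omega) (by omega) (by omega)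
      unfold FrameLayout.objsAt Vorbis.Frames.decode_all
      simp only [List.map_cons, List.mem_cons, true_or, or_true]
    · right
      rw [w_rdx, e2]
      refine decode_all.da_stackObj 64 8 ?_ (by omega) (by omega) (by omega)
      unfold FrameLayout.objsAt Vorbis.Frames.decode_all
      simp only [List.map_cons, List.mem_cons, true_or, or_true]
    · right
      right
      rw [w_rsi, w_rdx, e1, e2]
      unfold Top.RangesApart
      left
      omega
  · -- 0x1035c8 `jge` taken: `k ≥ len`, the loop's exit; nothing was written
    refine ReachVia.done (Or.inr ?_)
    have hfrm' : decode_all.DFrame others frames len u₀ u ret others' s_1035c8 := by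
      refine ⟨he0, hpre0, w_rsp, ?_, ?_, ?_, ?_, ?_, ?_, ?_, ?_, ?_, Vorbis.conv_code_in w_eq, ?_, ?_, hfixed, hoffT⟩
      · rw [w_mem]
        exact k_r15
      · rw [w_mem]
        exact k_r14
      · rw [w_mem]
        exact k_r13
      · rw [w_mem]
        exact k_r12
      · rw [w_mem]
        exact k_rbp
      · rw [w_mem]
        exact k_rbx
      · rw [w_mem]
        exact k_ret
      · rw [w_mem]
        exact k_out
      · rw [w_mem]
        exact hsame
      · v_inv
      · rw [w_mem]
        exact hinv
    refine ⟨w_rip, hfrm', ?_, ?_, ?_, ?_, ?_, ?_, ?_, hstle, ⟨hAB, hAL⟩, ?_⟩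
    · rw [w_kept .rbx rfl]
      exact c_rbx
    · rw [w_kept .rbp rfl]
      exact c_rbp
    · rw [w_kept .r14 rfl]
      exact c_r14
    · rw [w_kept .r13 rfl]
      exact c_r13
    · rw [w_mem]
      exact k_sh
    · rw [w_mem]
      exact k_room
    · rw [w_mem]
      exact k_st
    · rw [w_mem]
      exact hdi
  · -- 0x1035da = cut3: the assertion, from the callee's footprint and postcondition
    have hklt : k < len := by
      rw [hk31, hl31] at hbr_1035c8
      omega
    have c_rdi := w_rdi_1035d5
    v_after_call w_rsp_1035d5 w_mem_1035d5
    simp only [w_rsi_1035d5, w_rdx_1035d5] at w_same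
    obtain ⟨hinv1, hdi1, hn0, hn32, hout1⟩ := w_post
    rw [c_rdi, c_r14] at hdi1 hout1
    rw [w_rsi_1035d5, w_rdx_1035d5] at hout1
    have e1 : (u.reg .rsp - 136).toNat = (u.reg .rsp).toNat - 136 := by u_omega
    have e2 : (u.reg .rsp - 120).toNat = (u.reg .rsp).toNat - 120 := by u_omega
    rw [e1, e2] at hout1
    have e_top : (s_1035d5r.reg .rsp).toNat = (u.reg .rsp).toNat - 232 := by
      rw [w_rsp]
      u_omega
    rw [e_top] at hinv1
    -- the stack slots through the pushed return address and the callee's footprint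
    have q15 : UInt64.ofNat (s_1035d5r.mem.readLE (u.reg .rsp - 8) 8) = u.reg .r15 := by u_frame k_r15
    have q14 : UInt64.ofNat (s_1035d5r.mem.readLE (u.reg .rsp - 16) 8) = u.reg .r14 := by u_frame k_r14
    have q13 : UInt64.ofNat (s_1035d5r.mem.readLE (u.reg .rsp - 24) 8) = u.reg .r13 := by u_frame k_r13
    have q12 : UInt64.ofNat (s_1035d5r.mem.readLE (u.reg .rsp - 32) 8) = u.reg .r12 := by u_frame k_r12
    have qbp : UInt64.ofNat (s_1035d5r.mem.readLE (u.reg .rsp - 40) 8) = u.reg .rbp := by u_frame k_rbp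
    have qbx : UInt64.ofNat (s_1035d5r.mem.readLE (u.reg .rsp - 48) 8) = u.reg .rbx := by u_frame k_rbx
    have q0 : UInt64.ofNat (s_1035d5r.mem.readLE (u.reg .rsp) 8) = ret := by u_frame k_ret
    have qout : s_1035d5r.mem.readLE (u.reg .rsp - 216) 8 = 4194304 := by u_frame k_out
    have qsh : UInt64.ofNat (s_1035d5r.mem.readLE (u.reg .rsp - 192) 8) = (u.reg .rsp - 184) >>> 3 := by u_frame k_sh
    have qroom : s_1035d5r.mem.readLE (u.reg .rsp - 224) 8 = 786424 := by u_frame k_room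
    have qst : s_1035d5r.mem.readLE (u.reg .rsp - 232) 8 = st := by u_frame k_st
    -- the footprint so far
    have hpush : Mem.SameExcept _ u.mem (v.mem.writeLE (u.reg .rsp - 240) 8 (UInt64.toNat (L.decode_all.loop1 + 21))) :=
      Mem.SameExcept.step_writeLE' (u.reg .rsp - 240) 8 _ hsame (by u_omega) (by u_same_side)
    have hsame' := seg3_through_callee hpush w_same (by
      simp only [List.forall_mem_cons, List.not_mem_nil, false_imp_iff, implies_true, and_true, X86.User.inSpans_cons,
        X86.User.inSpans_nil, or_false]
      repeat' apply And.intro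
      all_goals u_omega)
    obtain ⟨hs32, hn31⟩ := decode_all.da_s32_result _ hn0 hn32
    rw [hs32] at hout1
    have hfrm' : decode_all.DFrame others frames len u₀ u ret others' s_1035d5r :=
      ⟨he0, hpre0, w_rsp, q15, q14, q13, q12, qbp, qbx, q0, qout, hsame', w_code, w_inv, hinv1, hfixed, hoffT⟩
    refine ReachVia.done (Or.inl ⟨(s_1035d5r.reg .rax).toNat, ?_⟩)
    refine ⟨w_rip, ⟨hfrm', ?_, ?_, ?_, ?_, qsh, qroom, qst, hstle, ⟨hAB, hAL⟩, hdi1⟩, ?_, hklt, ?_, hn31, ?_⟩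
    · rw [w_kept .rbx rfl]
      exact c_rbx
    · rw [w_kept .rbp rfl]
      exact c_rbp
    · rw [w_kept .r14 rfl]
      exact c_r14
    · rw [w_kept .r13 rfl]
      exact c_r13
    · rw [w_kept .r12 rfl]
      exact c_r12
    · exact UInt64.ofNat_toNat.symm
    · intro hne
      apply hout1
      intro h0
      apply hne
      omega
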